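-- pv_equiv track=rewrite | github.com/dkrotx/leetcode | 161-one_edit_distance.py | canSkipOneChar
-- ===== SOURCE A (Python) =====
-- def canSkipOneChar(big, small):
--     assert(len(big) == len(small) + 1)
--
--     skipped = False
--     bi = si = 0
--     for bi in range(len(big)):
--         if si < len(small) and big[bi] == small[si]:
--             si += 1
--         else:
--             # do not shift `si'
--             if skipped:
--                 return False
--             skipped = True
--
--     assert(skipped) # lenghts are different, so we should skip smthng anyway
--     return True
-- ===== SOURCE B (Python) =====
-- def canSkipOneChar(big, small):
--     assert(len(big) == len(small) + 1)
--     for i in range(len(small)):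
--         if big[i] != small[i]:
--             return big[i+1:] == small[i:]
--     return True
-- ===== Notes on version B (the rewrite author's own statement) =====
-- stated objective: simpler
-- what changed: Replaces the greedy skip-flag state machine over big with a find-first-divergence scan followed by a single tail slice comparison.
import Mathlib
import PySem

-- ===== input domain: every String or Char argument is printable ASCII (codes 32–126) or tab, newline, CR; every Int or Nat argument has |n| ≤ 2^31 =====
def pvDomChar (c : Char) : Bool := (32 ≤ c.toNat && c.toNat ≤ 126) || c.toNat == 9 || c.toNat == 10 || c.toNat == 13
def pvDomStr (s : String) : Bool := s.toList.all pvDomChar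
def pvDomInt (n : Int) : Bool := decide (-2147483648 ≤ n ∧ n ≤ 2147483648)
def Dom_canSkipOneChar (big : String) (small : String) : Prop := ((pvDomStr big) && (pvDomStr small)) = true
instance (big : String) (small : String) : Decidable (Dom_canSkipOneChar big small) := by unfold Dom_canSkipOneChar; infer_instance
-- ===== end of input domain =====

-- B replaces A's greedy skip-flag state machine with a find-first-divergence scan plus one tail comparison (simpler).


-- ===== PORT A =====
-- A's for-loop over bi in range(len(big)) with state (si, skipped); early `return False` becomes
-- returning false from the recursion; the final `assert(skipped)` always holds under Pre_ (see lemma note).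
def pvALoop (b : List Char) (s : List Char) (si : Nat) (skipped : Bool) : Bool :=
  match b with
  | [] => true
  | c :: b' =>
    if si < s.length ∧ s[si]? = some c then pvALoop b' s (si + 1) skipped
    else if skipped then false
    else pvALoop b' s si true

def canSkipOneChar (big : String) (small : String) : Bool :=
  pvALoop big.toList small.toList 0 false

-- ===== PORT B =====
-- B's loop: advance while big[i] == small[i]; at the first mismatch compare big[i+1:] with small[i:].
-- The `b = []` case is unreachable under Pre_ (Python would raise IndexError there).
def pvBLoop (b : List Char) (s : List Char) : Bool :=
  match s with
  | [] => true
  | c :: s' =>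
    match b with
    | [] => true
    | d :: b' => if d ≠ c then decide (b' = c :: s') else pvBLoop b' s'

def canSkipOneChar_alt (big : String) (small : String) : Bool :=
  pvBLoop big.toList small.toList

-- ===== PRECONDITION & SPEC =====
-- Pre_ excludes exactly the inputs on which A's leading assert fails (AssertionError): len(big) ≠ len(small)+1.
def Pre_canSkipOneChar (big : String) (small : String) : Prop :=
  big.toList.length = small.toList.length + 1
instance (big : String) (small : String) : Decidable (Pre_canSkipOneChar big small) := by
  unfold Pre_canSkipOneChar; infer_instance

def pvWitness_canSkipOneChar : String × String := ("ab", "a")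

def Spec_canSkipOneChar (big : String) (small : String) (out : Bool) : Prop := out = canSkipOneChar_alt big small
instance (big : String) (small : String) (out : Bool) : Decidable (Spec_canSkipOneChar big small out) := by unfold Spec_canSkipOneChar; infer_instance

-- ===== CLAIM (what is proved, stated in full; the proofs are below) =====
def Claim_equal_canSkipOneChar : Prop := ∀ (big : String) (small : String), Dom_canSkipOneChar big small → Pre_canSkipOneChar big small → Spec_canSkipOneChar big small (canSkipOneChar big small)

-- ===== LEMMAS AND PROOFS =====

-- Proof-only reformulation of A's loop carrying the unmatched suffix of `small` instead of the index si.
def pvASuf (b : List Char) (t : List Char) (skipped : Bool) : Bool :=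
  match b with
  | [] => true
  | c :: b' =>
    match t with
    | [] => if skipped then false else pvASuf b' [] true
    | c₁ :: t' =>
      if c₁ = c then pvASuf b' t' skipped
      else if skipped then false
      else pvASuf b' (c₁ :: t') true

lemma pvALoop_eq_suf (b : List Char) : ∀ (s : List Char) (si : Nat) (skipped : Bool),
    pvALoop b s si skipped = pvASuf b (s.drop si) skipped := by
  induction b with
  | nil => intro s si skipped; rfl
  | cons c b' ih =>
    intro s si skipped
    have hhead : s[si]? = (s.drop si).head? := List.head?_drop.symm
    cases hd : s.drop si with
    | nil =>
      have hnone : s[si]? = none := by rw [hhead, hd]; rfl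
      have hlen : ¬ si < s.length := by
        intro h
        exact (List.getElem?_eq_none_iff.mp hnone).not_gt h
      simp [pvALoop, pvASuf, hlen, ih, hd]
    | cons c₁ t' =>
      have hsome : s[si]? = some c₁ := by rw [hhead, hd]; rfl
      have hlen : si < s.length := List.getElem?_eq_some_iff.mp hsome |>.1
      have hdrop1 : s.drop (si + 1) = t' := by
        have : (s.drop si).drop 1 = s.drop (si + 1) := by
          rw [List.drop_drop]
        rw [← this, hd]; rfl
      by_cases hc : c₁ = c
      · have hget : s[si] = c := hc ▸ (List.getElem?_eq_some_iff.mp hsome).2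
        simp [pvALoop, pvASuf, hlen, hget, hc, ih, hdrop1]
      · have hne : ¬ s[si]? = some c := by
          rw [hsome]; simp [hc]
        simp [pvALoop, pvASuf, hd, hc, hne, ih]

lemma pvASuf_true (b : List Char) : ∀ (t : List Char), b.length = t.length →
    pvASuf b t true = decide (b = t) := by
  induction b with
  | nil =>
    intro t h
    cases t with
    | nil => rfl
    | cons _ _ => simp at h
  | cons c b' ih =>
    intro t h
    cases t with
    | nil => simp at h
    | cons c₁ t' =>
      simp only [List.length_cons, Nat.add_right_cancel_iff] at h
      by_cases hc : c₁ = c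
      · subst hc
        simp [pvASuf, ih t' h]
      · simp [pvASuf, hc, Ne.symm hc]

lemma pvASuf_false (b : List Char) : ∀ (t : List Char), b.length = t.length + 1 →
    pvASuf b t false = pvBLoop b t := by
  induction b with
  | nil => intro t h; simp at h
  | cons c b' ih =>
    intro t h
    cases t with
    | nil =>
      have hb : b' = [] := by
        simpa using h
      subst hb; rfl
    | cons c₁ t' =>
      simp only [List.length_cons, Nat.add_right_cancel_iff] at h
      by_cases hc : c₁ = c
      · subst hc
        simp [pvASuf, pvBLoop, ih t' h]
      · have hlen : b'.length = (c₁ :: t').length := by simp [h]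
        simp [pvASuf, pvBLoop, hc, Ne.symm hc, pvASuf_true b' (c₁ :: t') hlen]

-- ===== VERDICT (by name: the statement is the Claim_ definition above) =====
theorem canSkipOneChar_spec : Claim_equal_canSkipOneChar := by
  intro big small _ hpre
  unfold Spec_canSkipOneChar canSkipOneChar canSkipOneChar_alt
  rw [pvALoop_eq_suf, List.drop_zero, pvASuf_false _ _ hpre]
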